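-- pv_equiv track=rewrite | github.com/pypi-data/pypi-mirror-304 | packages/axon-projection/axon_projection-0.1.1-py3-none-any.whl/axon_projection/choose_hierarchy_level.py | find_parent_acronym
-- ===== SOURCE A (Python) =====
-- def find_parent_acronym(acronym, parent_mapping, target_regions):
--     """Find the parent acronym of the given acronym."""
--     # Check if the current acronym is in target regions
--     if acronym in target_regions:
--         return acronym
--     # Check parents up the hierarchy
--     parent = parent_mapping.get(acronym)
--     while parent:
--         if parent in target_regions:
--             return parent
--         parent = parent_mapping.get(parent)
--     return None
-- ===== SOURCE B (Python) =====
-- def find_parent_acronym(acronym, parent_mapping, target_regions):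
--     """Find the parent acronym of the given acronym."""
--     # Pass 1: materialize the ancestor chain (acronym, then successive parents).
--     # len(parent_mapping) steps cover any acyclic chain (each step consumes a
--     # distinct key), so this pass terminates even on cyclic mappings.
--     chain = [acronym]
--     node = acronym
--     for _ in range(len(parent_mapping)):
--         parent = parent_mapping.get(node)
--         if not parent:
--             break
--         chain.append(parent)
--         node = parent
--     # Pass 2: first element of the chain that is a target region.
--     for region in chain:
--         if region in target_regions:
--             return region
--     return None
-- ===== Notes on version B (the rewrite author's own statement) =====
-- stated objective: alternative
-- what changed: A's single interleaved walk-and-test loop is split into two passes: first collect the ancestor chain (bounded by the mapping's size, so it terminates even on cyclic mappings), then scan it for the first target region.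
import Mathlib
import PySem

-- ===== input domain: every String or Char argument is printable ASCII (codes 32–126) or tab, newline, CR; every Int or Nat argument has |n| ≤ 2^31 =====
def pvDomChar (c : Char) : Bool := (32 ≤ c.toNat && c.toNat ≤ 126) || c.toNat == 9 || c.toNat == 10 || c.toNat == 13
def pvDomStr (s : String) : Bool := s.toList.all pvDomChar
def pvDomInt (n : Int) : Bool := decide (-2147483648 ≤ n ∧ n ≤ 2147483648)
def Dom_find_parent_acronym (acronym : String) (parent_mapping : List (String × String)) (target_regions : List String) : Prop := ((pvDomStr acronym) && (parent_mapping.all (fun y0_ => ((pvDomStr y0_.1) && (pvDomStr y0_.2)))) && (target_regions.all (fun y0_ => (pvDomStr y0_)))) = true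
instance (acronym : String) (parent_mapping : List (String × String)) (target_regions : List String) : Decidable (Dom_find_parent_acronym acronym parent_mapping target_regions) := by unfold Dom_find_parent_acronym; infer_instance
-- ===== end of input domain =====

-- B restructures A's single interleaved walk-and-test loop into a collect-the-ancestor-chain
-- pass (bounded by the mapping's size, so it terminates even on cyclic mappings) followed by a
-- separate first-match scan (objective: alternative decomposition).

-- ===== PORT A =====
-- A's `while parent:` loop; fuel parent_mapping.length + 1 suffices on every input on which the
-- Python loop returns (each successful lookup before the answer consumes a distinct key).
def pvLoopA (pm : List (String × String)) (tr : List String) : Option String → Nat → Option String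
  | _, 0 => none
  | parent, n + 1 =>
      match parent with
      | some p =>
          if p ≠ "" then                                   -- `while parent:` (empty string is falsy)
            if tr.contains p then some p
            else pvLoopA pm tr ((PySem.Dict.mk pm).get? p) n
          else none
      | none => none

def find_parent_acronym (acronym : String) (parent_mapping : List (String × String)) (target_regions : List String) : Option String :=
  if target_regions.contains acronym then some acronym
  else pvLoopA parent_mapping target_regions ((PySem.Dict.mk parent_mapping).get? acronym) (parent_mapping.length + 1)

-- ===== PORT B =====
-- B's pass 1: the ancestors above `node`, at most `fuel` of them (Source B's `for _ in range(len(parent_mapping))`).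
def pvCollect (pm : List (String × String)) : String → Nat → List String
  | _, 0 => []
  | node, n + 1 =>
      match (PySem.Dict.mk pm).get? node with
      | some p => if p = "" then [] else p :: pvCollect pm p n     -- `if not parent: break`
      | none => []

def find_parent_acronym_alt (acronym : String) (parent_mapping : List (String × String)) (target_regions : List String) : Option String :=
  let chain := acronym :: pvCollect parent_mapping acronym parent_mapping.length
  chain.find? (fun region => target_regions.contains region)     -- B's pass 2: first chain element in target_regions

-- ===== PRECONDITION & SPEC =====
-- One parent step in the mapping's graph (none = no parent / empty parent, i.e. the chain ends).
def pvParentStep (pm : List (String × String)) (o : Option String) : Option String :=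
  o.bind fun node =>
    match (PySem.Dict.mk pm).get? node with
    | some p => if p = "" then none else some p
    | none => none

-- Pre_ excludes exactly the inputs on which the Python A DIVERGES (its walk cycles without ever
-- meeting a target region): it requires that the ancestor chain either ends within
-- |parent_mapping| + 1 parent steps (by pigeonhole a longer chain cycles) or meets a target
-- region within those steps (every node of a cyclic walk, hence A's answer, occurs that early).
def Pre_find_parent_acronym (acronym : String) (parent_mapping : List (String × String)) (target_regions : List String) : Prop :=
  (pvParentStep parent_mapping)^[parent_mapping.length + 1] (some acronym) = none
  ∨ ((List.range (parent_mapping.length + 1)).any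
      (fun i => ((pvParentStep parent_mapping)^[i] (some acronym)).elim false target_regions.contains)) = true

instance (acronym : String) (parent_mapping : List (String × String)) (target_regions : List String) : Decidable (Pre_find_parent_acronym acronym parent_mapping target_regions) := by unfold Pre_find_parent_acronym; infer_instance

def pvWitness_find_parent_acronym : String × (List (String × String)) × List String :=
  ("AVP", [("AVP", "HY"), ("HY", "BS"), ("BS", "root")], ["HY", "CTX"])

def Spec_find_parent_acronym (acronym : String) (parent_mapping : List (String × String)) (target_regions : List String) (out : Option String) : Prop := out = find_parent_acronym_alt acronym parent_mapping target_regions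
instance (acronym : String) (parent_mapping : List (String × String)) (target_regions : List String) (out : Option String) : Decidable (Spec_find_parent_acronym acronym parent_mapping target_regions out) := by unfold Spec_find_parent_acronym; infer_instance

-- ===== CLAIM (what is proved, stated in full; the proofs are below) =====
def Claim_equal_find_parent_acronym : Prop := ∀ (acronym : String) (parent_mapping : List (String × String)) (target_regions : List String), Dom_find_parent_acronym acronym parent_mapping target_regions → Pre_find_parent_acronym acronym parent_mapping target_regions → Spec_find_parent_acronym acronym parent_mapping target_regions (find_parent_acronym acronym parent_mapping target_regions)

-- ===== LEMMAS AND PROOFS =====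
-- A's interleaved loop computes the first target on the (same-fuel) collected chain.
theorem pvLoopA_eq_find (pm : List (String × String)) (tr : List String) :
    ∀ (n : Nat) (s : String),
      pvLoopA pm tr ((PySem.Dict.mk pm).get? s) n
        = (pvCollect pm s n).find? (fun region => tr.contains region) := by
  intro n
  induction n with
  | zero => intro s; simp [pvLoopA, pvCollect]
  | succ n ih =>
      intro s
      cases h : (PySem.Dict.mk pm).get? s with
      | none => simp [pvLoopA, pvCollect, h]
      | some p =>
          by_cases hp : p = ""
          · simp [pvLoopA, pvCollect, h, hp]
          · by_cases ht : p ∈ tr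
            · simp [pvLoopA, pvCollect, h, hp, ht]
            · simp [pvLoopA, pvCollect, h, hp, ht, ih p]

-- Single-step unfolding equations for pvCollect (fuel n stays a variable, so simp stops).
theorem pvCollect_cons (pm : List (String × String)) (s p : String) (n : Nat)
    (hg : (PySem.Dict.mk pm).get? s = some p) (hp : p ≠ "") :
    pvCollect pm s (n + 1) = p :: pvCollect pm p n := by
  simp [pvCollect, hg, hp]

-- One more unit of fuel only appends to the collected chain.
theorem pvCollect_succ_append (pm : List (String × String)) :
    ∀ (n : Nat) (s : String), ∃ t, pvCollect pm s (n + 1) = pvCollect pm s n ++ t := by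
  intro n
  induction n with
  | zero => intro s; exact ⟨pvCollect pm s 1, by simp [pvCollect]⟩
  | succ n ih =>
      intro s
      cases h : (PySem.Dict.mk pm).get? s with
      | none => exact ⟨[], by simp [pvCollect, h]⟩
      | some p =>
          by_cases hp : p = ""
          · exact ⟨[], by simp [pvCollect, h, hp]⟩
          · obtain ⟨t, ht⟩ := ih p
            refine ⟨t, ?_⟩
            rw [pvCollect_cons pm s p (n + 1) h hp, pvCollect_cons pm s p n h hp, ht]
            rfl

-- If the chain ends within n+1 steps, one more unit of fuel collects nothing new.
theorem pvCollect_of_terminates (pm : List (String × String)) :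
    ∀ (n : Nat) (s : String), (pvParentStep pm)^[n + 1] (some s) = none →
      pvCollect pm s (n + 1) = pvCollect pm s n := by
  intro n
  induction n with
  | zero =>
      intro s h
      cases hg : (PySem.Dict.mk pm).get? s with
      | none => simp [pvCollect, hg]
      | some p =>
          by_cases hp : p = ""
          · simp [pvCollect, hg, hp]
          · exfalso
            simp [pvParentStep, hg, hp] at h
  | succ n ih =>
      intro s h
      cases hg : (PySem.Dict.mk pm).get? s with
      | none => simp [pvCollect, hg]
      | some p =>
          by_cases hp : p = ""
          · simp [pvCollect, hg, hp]
          · have hstep : pvParentStep pm (some s) = some p := by simp [pvParentStep, hg, hp]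
            have h' : (pvParentStep pm)^[n + 1] (some p) = none := by
              have := h
              rw [Function.iterate_succ_apply, hstep] at this
              exact this
            rw [pvCollect_cons pm s p (n + 1) hg hp, pvCollect_cons pm s p n hg hp, ih p h']

-- A node reached after i+1 ≤ n parent steps occurs in the chain collected with fuel n.
theorem pvStep_mem_collect (pm : List (String × String)) :
    ∀ (i : Nat) (s x : String) (n : Nat), (pvParentStep pm)^[i + 1] (some s) = some x →
      i + 1 ≤ n → x ∈ pvCollect pm s n := by
  intro i
  induction i with
  | zero =>
      intro s x n h hn
      obtain ⟨m, rfl⟩ : ∃ m, n = m + 1 := ⟨n - 1, by omega⟩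
      cases hg : (PySem.Dict.mk pm).get? s with
      | none => simp [pvParentStep, hg] at h
      | some p =>
          by_cases hp : p = ""
          · simp [pvParentStep, hg, hp] at h
          · simp [pvParentStep, hg, hp] at h
            subst h
            simp [pvCollect, hg, hp]
  | succ i ih =>
      intro s x n h hn
      obtain ⟨m, rfl⟩ : ∃ m, n = m + 1 := ⟨n - 1, by omega⟩
      cases hg : (PySem.Dict.mk pm).get? s with
      | none =>
          exfalso
          have hstep : pvParentStep pm (some s) = none := by simp [pvParentStep, hg]
          rw [Function.iterate_succ_apply, hstep, Function.iterate_fixed (by simp [pvParentStep])] at h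
          simp at h
      | some p =>
          by_cases hp : p = ""
          · exfalso
            have hstep : pvParentStep pm (some s) = none := by simp [pvParentStep, hg, hp]
            rw [Function.iterate_succ_apply, hstep, Function.iterate_fixed (by simp [pvParentStep])] at h
            simp at h
          · have hstep : pvParentStep pm (some s) = some p := by simp [pvParentStep, hg, hp]
            rw [Function.iterate_succ_apply, hstep] at h
            have := ih p x m h (by omega)
            simp [pvCollect, hg, hp]
            exact Or.inr this

-- ===== VERDICT (by name: the statement is the Claim_ definition above) =====
theorem find_parent_acronym_spec : Claim_equal_find_parent_acronym := by
  intro acronym pm tr _ hpre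
  unfold Spec_find_parent_acronym find_parent_acronym find_parent_acronym_alt
  by_cases h : acronym ∈ tr
  · simp [h, List.find?]
  · simp only [List.contains_eq_mem, h, decide_false, Bool.false_eq_true, if_false]
    rw [pvLoopA_eq_find pm tr (pm.length + 1) acronym]
    simp only [List.find?]
    simp only [List.contains_eq_mem, h, decide_false]
    cases hpre with
    | inl hterm => rw [pvCollect_of_terminates pm pm.length acronym hterm]
    | inr htgt =>
        rw [List.any_eq_true] at htgt
        obtain ⟨i, hi, hx⟩ := htgt
        rw [List.mem_range] at hi
        cases hstep : (pvParentStep pm)^[i] (some acronym) with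
        | none => rw [hstep] at hx; simp at hx
        | some x =>
            rw [hstep] at hx
            simp only [Option.elim] at hx
            rw [List.contains_eq_mem, decide_eq_true_iff] at hx
            -- i = 0 would make x = acronym ∈ tr, contradicting h
            obtain ⟨j, rfl⟩ : ∃ j, i = j + 1 := by
              cases i with
              | zero => exfalso; simp at hstep; exact h (hstep ▸ hx)
              | succ j => exact ⟨j, rfl⟩
            have hmem : x ∈ pvCollect pm acronym pm.length :=
              pvStep_mem_collect pm j acronym x pm.length hstep (by omega)
            have hsome : ((pvCollect pm acronym pm.length).find?
                (fun region => tr.contains region)).isSome := by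
              rw [List.find?_isSome]
              exact ⟨x, hmem, by simp [hx]⟩
            obtain ⟨y, hy⟩ := Option.isSome_iff_exists.mp hsome
            obtain ⟨t, ht⟩ := pvCollect_succ_append pm pm.length acronym
            simp only [List.contains_eq_mem] at hy
            rw [ht, List.find?_append, hy]
            simp
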